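-- pv_equiv track=rewrite | github.com/boldejman/GravitationalMotionSimulator | mode/menuMode.py | separateText
-- ===== SOURCE A (Python) =====
-- def separateText(text):
--     splittedText = text.split()
--     fLine = ''
--     sLine = ''
--     i = 0
--     lineLen = 0
--     while i < len(splittedText) and lineLen + len(splittedText[i]) < 15:
--         fLine += ' ' + splittedText[i]
--         lineLen += len(splittedText[i])
--         i += 1
--     if i < len(splittedText):
--         while i != len(splittedText):
--             sLine += ' ' + splittedText[i]
--             i += 1
--     return fLine, sLine
-- ===== SOURCE B (Python) =====
-- def separateText(text):
--     words = text.split()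
--     # prefix sums of word lengths
--     cums = []
--     t = 0
--     for w in words:
--         t += len(w)
--         cums.append(t)
--     # binary search: first index i with cums[i] >= 15 (cums is nondecreasing)
--     lo, hi = 0, len(cums)
--     while lo < hi:
--         mid = (lo + hi) // 2
--         if cums[mid] < 15:
--             lo = mid + 1
--         else:
--             hi = mid
--     f = words[:lo]
--     s = words[lo:]
--     fLine = ' ' + ' '.join(f) if f else ''
--     sLine = ' ' + ' '.join(s) if s else ''
--     return fLine, sLine
-- ===== Notes on version B (the rewrite author's own statement) =====
-- stated objective: alternative
-- what changed: B first materialises the prefix sums of the word lengths, locates the split point by a hand-written binary search over that sorted array (valid because prefix sums are nondecreasing), and then builds each line by slicing the word list and joining it with single spaces, instead of A's greedy loops that grow both strings incrementally.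
import Mathlib
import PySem

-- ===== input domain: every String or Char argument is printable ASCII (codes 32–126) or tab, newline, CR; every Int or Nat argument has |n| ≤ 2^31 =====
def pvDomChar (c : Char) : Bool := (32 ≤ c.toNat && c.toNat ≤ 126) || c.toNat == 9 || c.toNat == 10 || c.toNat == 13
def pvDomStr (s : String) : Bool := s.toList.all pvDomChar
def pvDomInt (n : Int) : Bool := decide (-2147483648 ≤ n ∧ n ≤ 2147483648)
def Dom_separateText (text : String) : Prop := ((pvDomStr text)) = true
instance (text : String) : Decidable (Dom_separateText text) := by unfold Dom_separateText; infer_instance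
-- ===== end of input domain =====

-- B finds the split point by a binary search over the prefix sums of the word lengths and
-- builds each line by slice + join, instead of A's greedy string-accumulating loops
-- (alternative algorithm; same asymptotic cost).


-- ===== PORT A =====
-- first while loop: accumulates fLine and lineLen, stops at the 15-threshold; returns fLine and the unconsumed words
def aLoop : List (List Char) → List Char → Nat → List Char × List (List Char)
  | [], fLine, _ => (fLine, [])
  | w :: rest, fLine, lineLen =>
      if lineLen + w.length < 15 then aLoop rest (fLine ++ ' ' :: w) (lineLen + w.length)
      else (fLine, w :: rest)

-- second while loop: accumulates sLine over the remaining words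
def sLoop : List (List Char) → List Char → List Char
  | [], sLine => sLine
  | w :: rest, sLine => sLoop rest (sLine ++ ' ' :: w)

def separateText (text : String) : String × String :=
  let splittedText := PySem.Chars.split₀ text.toList
  let p := aLoop splittedText [] 0
  (String.ofList p.1, String.ofList (sLoop p.2 []))

-- ===== PORT B =====
-- the python loop 'for w in words: t += len(w); cums.append(t)' building the prefix sums
def cumsLoop : List (List Char) → Nat → List Nat
  | [], _ => []
  | w :: rest, t => (t + w.length) :: cumsLoop rest (t + w.length)

-- the python 'while lo < hi' binary search for the first index with cums[i] >= 15
def bsearch (cums : List Nat) (lo hi : Nat) : Nat :=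
  if lo < hi then
    let mid := (lo + hi) / 2
    if cums.getD mid 0 < 15 then bsearch cums (mid + 1) hi
    else bsearch cums lo mid
  else lo
termination_by hi - lo
decreasing_by all_goals omega

-- "' ' + ' '.join(ws) if ws else ''"
def lineOf (ws : List (List Char)) : List Char :=
  match ws with
  | [] => []
  | _ => ' ' :: PySem.Chars.join [' '] ws

def separateText_alt (text : String) : String × String :=
  let words := PySem.Chars.split₀ text.toList
  let cums := cumsLoop words 0
  let lo := bsearch cums 0 cums.length
  (String.ofList (lineOf (words.take lo)), String.ofList (lineOf (words.drop lo)))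

-- ===== PRECONDITION & SPEC =====
def Spec_separateText (text : String) (out : String × String) : Prop := out = separateText_alt text
instance (text : String) (out : String × String) : Decidable (Spec_separateText text out) := by unfold Spec_separateText; infer_instance

-- ===== CLAIM (what is proved, stated in full; the proofs are below) =====
def Claim_equal_separateText : Prop := ∀ (text : String), Dom_separateText text → Spec_separateText text (separateText text)

-- ===== LEMMAS AND PROOFS =====

-- A's greedy split index, used only in the proofs to characterize both ports
def splitIdx : List (List Char) → Nat → Nat
  | [], _ => 0
  | w :: rest, total => if total + w.length < 15 then splitIdx rest (total + w.length) + 1 else 0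

theorem lineOf_cons (w : List Char) (ws : List (List Char)) :
    lineOf (w :: ws) = (' ' :: w) ++ lineOf ws := by
  cases ws with
  | nil => simp [lineOf, PySem.Chars.join_singleton]
  | cons v vs => simp [lineOf, PySem.Chars.join_cons_cons]

theorem sLoop_eq (ws : List (List Char)) (acc : List Char) :
    sLoop ws acc = acc ++ lineOf ws := by
  induction ws generalizing acc with
  | nil => simp [sLoop, lineOf]
  | cons w rest ih => simp [sLoop, ih, lineOf_cons]

theorem aLoop_eq (ws : List (List Char)) (f : List Char) (L : Nat) :
    aLoop ws f L = (f ++ lineOf (ws.take (splitIdx ws L)), ws.drop (splitIdx ws L)) := by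
  induction ws generalizing f L with
  | nil => simp [aLoop, splitIdx, lineOf]
  | cons w rest ih =>
    by_cases h : L + w.length < 15
    · simp [aLoop, splitIdx, h, ih, lineOf_cons]
    · simp [aLoop, splitIdx, h, lineOf]

theorem cumsLoop_length (ws : List (List Char)) (t : Nat) :
    (cumsLoop ws t).length = ws.length := by
  induction ws generalizing t with
  | nil => simp [cumsLoop]
  | cons w rest ih => simp [cumsLoop, ih]

theorem cumsLoop_lb (ws : List (List Char)) (t : Nat) (i : Nat) (hi : i < ws.length) :
    t ≤ (cumsLoop ws t).getD i 0 := by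
  induction ws generalizing t i with
  | nil => simp at hi
  | cons w rest ih =>
    cases i with
    | zero => simp [cumsLoop]
    | succ j =>
      simp only [cumsLoop, List.getD_cons_succ]
      have := ih (t + w.length) j (by simpa using hi)
      omega

theorem cumsLoop_mono (ws : List (List Char)) (t : Nat) (i j : Nat)
    (hij : i ≤ j) (hj : j < ws.length) :
    (cumsLoop ws t).getD i 0 ≤ (cumsLoop ws t).getD j 0 := by
  induction ws generalizing t i j with
  | nil => simp at hj
  | cons w rest ih =>
    cases i with
    | zero =>
      cases j with
      | zero => exact le_refl _
      | succ j' =>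
        simp only [cumsLoop, List.getD_cons_zero, List.getD_cons_succ]
        exact cumsLoop_lb rest (t + w.length) j' (by simpa using hj)
    | succ i' =>
      cases j with
      | zero => omega
      | succ j' =>
        simp only [cumsLoop, List.getD_cons_succ]
        exact ih (t + w.length) i' j' (by omega) (by simpa using hj)

-- binary-search invariant: under monotonicity, bsearch returns the unique boundary point
theorem bsearch_inv (cums : List Nat)
    (mono : ∀ i j, i ≤ j → j < cums.length → cums.getD i 0 ≤ cums.getD j 0)
    (lo hi : Nat) (hhi : hi ≤ cums.length) (hle : lo ≤ hi)
    (hlo : ∀ i, i < lo → cums.getD i 0 < 15)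
    (hhi2 : ∀ i, hi ≤ i → i < cums.length → 15 ≤ cums.getD i 0) :
    (∀ i, i < bsearch cums lo hi → cums.getD i 0 < 15) ∧
    (∀ i, bsearch cums lo hi ≤ i → i < cums.length → 15 ≤ cums.getD i 0) ∧
    bsearch cums lo hi ≤ cums.length := by
  induction lo, hi using bsearch.induct cums with
  | case1 lo hi hlt mid hm ih =>
    rw [bsearch]
    simp only [hlt, if_true]
    rw [show ((lo + hi) / 2) = mid from rfl]
    simp only [hm, if_true]
    exact ih hhi (by omega)
      (fun i h => lt_of_le_of_lt (mono i mid (by omega) (by omega)) hm)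
      hhi2
  | case2 lo hi hlt mid hm ih =>
    rw [bsearch]
    simp only [hlt, if_true]
    rw [show ((lo + hi) / 2) = mid from rfl]
    simp only [hm, if_false]
    exact ih (by omega) (by omega) hlo
      (fun i h1 h2 => le_trans (by omega : 15 ≤ cums.getD mid 0) (mono mid i (by omega) h2))
  | case3 lo hi hlt =>
    rw [bsearch]
    simp only [hlt, if_false]
    exact ⟨hlo, fun i h1 h2 => hhi2 i (by omega) h2, by omega⟩

-- the greedy index satisfies the same boundary characterization
theorem splitIdx_char (ws : List (List Char)) (t : Nat) :
    splitIdx ws t ≤ ws.length ∧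
    (∀ i, i < splitIdx ws t → (cumsLoop ws t).getD i 0 < 15) ∧
    (splitIdx ws t < ws.length → 15 ≤ (cumsLoop ws t).getD (splitIdx ws t) 0) := by
  induction ws generalizing t with
  | nil => simp [splitIdx]
  | cons w rest ih =>
    by_cases h : t + w.length < 15
    · obtain ⟨h1, h2, h3⟩ := ih (t + w.length)
      refine ⟨by simp [splitIdx, h]; omega, ?_, ?_⟩
      · intro i hi
        cases i with
        | zero => simpa [cumsLoop] using h
        | succ j =>
          simp only [cumsLoop, List.getD_cons_succ]
          exact h2 j (by simp [splitIdx, h] at hi; omega)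
      · intro hlt
        simp only [splitIdx, h, if_true] at hlt ⊢
        simp only [cumsLoop, List.getD_cons_succ]
        exact h3 (by simpa using hlt)
    · refine ⟨by simp [splitIdx, h], ?_, ?_⟩
      · intro i hi; simp [splitIdx, h] at hi
      · intro _; simp only [splitIdx, h, if_false]
        simpa [cumsLoop] using h

theorem bsearch_eq_splitIdx (ws : List (List Char)) :
    bsearch (cumsLoop ws 0) 0 (cumsLoop ws 0).length = splitIdx ws 0 := by
  have hlen := cumsLoop_length ws 0
  obtain ⟨b1, b2, b3⟩ := bsearch_inv (cumsLoop ws 0)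
    (fun i j hij hj => cumsLoop_mono ws 0 i j hij (by omega))
    0 (cumsLoop ws 0).length (le_refl _) (Nat.zero_le _)
    (by omega) (fun i h1 h2 => by omega)
  obtain ⟨s1, s2, s3⟩ := splitIdx_char ws 0
  set r := bsearch (cumsLoop ws 0) 0 (cumsLoop ws 0).length with hr
  set k := splitIdx ws 0 with hk
  rcases lt_trichotomy r k with h | h | h
  · have := s2 r h
    have := b2 r (le_refl _) (by omega)
    omega
  · exact h
  · have := b1 k h
    have := s3 (by omega)
    omega

-- ===== VERDICT (by name: the statement is the Claim_ definition above) =====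
theorem separateText_spec : Claim_equal_separateText := by
  intro text _
  unfold Spec_separateText separateText separateText_alt
  simp [aLoop_eq, sLoop_eq, bsearch_eq_splitIdx]
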